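-- pv_equiv track=rewrite | github.com/ColinKennedy/rez_developer_packages | rez_python_compatibility/python/python_compatibility/iterbot.py | iter_is_last
-- ===== SOURCE A (Python) =====
-- def iter_is_last(container):
--     """Iterate over a Python object and check if iterator's at the last element.
--
--     Reference:
--         https://stackoverflow.com/a/1630350
--
--     Args:
--         container (iter[object]): Some iterable object.
--
--     Raises:
--         ValueError: If `container` isn't iterable.
--
--     Yields:
--         tuple[bool, object]:
--             Return True if iterator's the last index, otherwise False + the
--             original object.
--
--     """
--     # Get an iterator and pull the first value.
--     try:
--         iterator = iter(container)
--     except TypeError: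
--         raise ValueError(
--             'Container "{container}" is not iterable.'.format(container=container)
--         )
--
--     try:
--         last = next(iterator)
--     except StopIteration:
--         # Prevents a DeprecationWarning in Python 3.5+
--         # Reference: https://stackoverflow.com/a/53373901
--         #
--         return
--         yield  # pylint: disable=unreachable
--
--     # Run the iterator to exhaustion (starting from the second value).
--     for value in iterator:
--         # Report the *previous* value (more to come).
--         yield False, last
--
--         last = value
--
--     # Report the last value.
--     yield True, last
-- ===== SOURCE B (Python) =====
-- def iter_is_last(container):
--     """Yield (is_last, value) for each element by indexing against the length.
--
--     Note: materializes the iterable up front (A is fully lazy); return values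
--     are identical for any finite iterable.
--     """
--     try:
--         items = list(container)
--     except TypeError:
--         raise ValueError(
--             'Container "{container}" is not iterable.'.format(container=container)
--         )
--
--     n = len(items)
--
--     for index, value in enumerate(items):
--         yield index == n - 1, value
-- ===== Notes on version B (the rewrite author's own statement) =====
-- stated objective: idiomatic
-- what changed: Replaces A's one-element-lag generator (carry the previous value, emit it when the next arrives, emit (True, last) after exhaustion) by materializing the iterable once and yielding (index == len-1, value) via enumerate; note B materializes the input while A stays lazy, return values are identical.
import Mathlib
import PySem

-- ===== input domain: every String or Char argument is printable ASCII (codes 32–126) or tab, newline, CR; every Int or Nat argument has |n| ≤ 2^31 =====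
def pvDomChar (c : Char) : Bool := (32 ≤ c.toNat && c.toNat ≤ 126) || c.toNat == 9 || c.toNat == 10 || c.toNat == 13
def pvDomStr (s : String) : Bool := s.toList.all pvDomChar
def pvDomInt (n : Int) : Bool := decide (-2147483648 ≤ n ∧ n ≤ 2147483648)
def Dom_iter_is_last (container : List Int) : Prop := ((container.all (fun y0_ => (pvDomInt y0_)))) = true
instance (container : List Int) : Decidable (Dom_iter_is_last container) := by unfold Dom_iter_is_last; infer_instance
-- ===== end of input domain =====

-- B yields (index == len-1, value) over enumerate instead of A's one-element-lag
-- generator; return values agree (B materializes the input, A is lazy).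

-- ===== PORT A =====
-- A's for-loop over the remaining iterator, carrying `last` (the previous value):
-- yields (False, last) for each further value, then (True, last) at exhaustion.
def iterIsLastLoopA : List Int → Int → List (Bool × Int)
  | [], last => [(true, last)]
  | value :: rest, last => (false, last) :: iterIsLastLoopA rest value

def iter_is_last (container : List Int) : List (Bool × Int) :=
  match container with
  | [] => []          -- `next(iterator)` raised StopIteration: generator returns nothing
  | first :: rest => iterIsLastLoopA rest first

-- ===== PORT B =====
def iter_is_last_alt (container : List Int) : List (Bool × Int) :=
  let n : Int := container.length
  (PySem.List.enumerate container).map (fun p => (p.1 == n - 1, p.2))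

-- ===== PRECONDITION & SPEC =====
def Spec_iter_is_last (container : List Int) (out : List (Bool × Int)) : Prop := out = iter_is_last_alt container
instance (container : List Int) (out : List (Bool × Int)) : Decidable (Spec_iter_is_last container out) := by unfold Spec_iter_is_last; infer_instance

-- ===== CLAIM (what is proved, stated in full; the proofs are below) =====
def Claim_equal_iter_is_last : Prop := ∀ (container : List Int), Dom_iter_is_last container → Spec_iter_is_last container (iter_is_last container)

-- ===== LEMMAS AND PROOFS =====
theorem iterIsLastLoopA_eq_enumerate (rest : List Int) :
    ∀ (x : Int) (s : Int),
      iterIsLastLoopA rest x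
        = (PySem.List.enumerate (x :: rest) s).map
            (fun p => (p.1 == s + (rest.length : Int), p.2)) := by
  induction rest with
  | nil =>
      intro x s
      simp [iterIsLastLoopA, PySem.List.enumerate_cons, PySem.List.enumerate_nil]
  | cons y ys ih =>
      intro x s
      have hfalse : (s == s + ((y :: ys).length : Int)) = false := by
        simp only [List.length_cons]
        have : s ≠ s + ((ys.length : Int) + 1) := by
          have : (0 : Int) < (ys.length : Int) + 1 := by positivity
          omega
        push_cast
        simpa using this
      have harith : s + ((y :: ys).length : Int) = (s + 1) + (ys.length : Int) := by
        simp only [List.length_cons]; push_cast; ring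
      calc iterIsLastLoopA (y :: ys) x
      _ = (false, x) :: iterIsLastLoopA ys y := rfl
      _ = (false, x) :: (PySem.List.enumerate (y :: ys) (s + 1)).map
            (fun p => (p.1 == (s + 1) + (ys.length : Int), p.2)) := by rw [ih]
      _ = (PySem.List.enumerate (x :: y :: ys) s).map
            (fun p => (p.1 == s + ((y :: ys).length : Int), p.2)) := by
          rw [harith]
          simp only [PySem.List.enumerate_cons, List.map_cons]
          have hne : ¬ (s = s + 1 + (ys.length : Int)) := by omega
          simp [hne]

-- ===== VERDICT (by name: the statement is the Claim_ definition above) =====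
theorem iter_is_last_spec : Claim_equal_iter_is_last := by
  intro container _
  unfold Spec_iter_is_last
  cases container with
  | nil => simp [iter_is_last, iter_is_last_alt, PySem.List.enumerate_nil]
  | cons first rest =>
      show iterIsLastLoopA rest first = iter_is_last_alt (first :: rest)
      unfold iter_is_last_alt
      rw [iterIsLastLoopA_eq_enumerate rest first 0]
      have h : (0 : Int) + (rest.length : Int) = ((first :: rest).length : Int) - 1 := by
        simp
      rw [h]
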